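-- pv_equiv track=rewrite | github.com/sonjuhyeon/programmers_coding_test | 프로그래머스/2/87377. 교점에 별 만들기/교점에 별 만들기.py | display_points
-- ===== SOURCE A (Python) =====
-- def display_points(points):
--     xs, ys = zip(*points)
--     min_x, max_x = min(xs), max(xs)
--     min_y, max_y = min(ys), max(ys)
--
--     grid = [['.' for _ in range(max_x - min_x + 1)] for _ in range(max_y - min_y + 1)]
--     for x, y in points:
--         grid[max_y - y][x - min_x] = '*'
--
--     return [''.join(row) for row in grid]
-- ===== SOURCE B (Python) =====
-- def display_points(points):
--     xs, ys = zip(*points)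
--     min_x, max_x = min(xs), max(xs)
--     min_y, max_y = min(ys), max(ys)
--
--     rows = {}
--     for x, y in points:
--         rows.setdefault(y, set()).add(x)
--
--     blank = '.' * (max_x - min_x + 1)
--     out = []
--     for y in range(max_y, min_y - 1, -1):
--         cols = rows.get(y)
--         if cols:
--             out.append(''.join('*' if x in cols else '.'
--                                for x in range(min_x, max_x + 1)))
--         else:
--             out.append(blank)
--     return out
-- ===== Notes on version B (the rewrite author's own statement) =====
-- stated objective: alternative
-- what changed: Instead of preallocating a full mutable grid and scattering '*' into it cell by cell, B groups the points by row into a dict of x-sets once and emits each output row directly: a precomputed blank string for rows without points, a per-cell membership scan only for rows that contain points.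
import Mathlib
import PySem

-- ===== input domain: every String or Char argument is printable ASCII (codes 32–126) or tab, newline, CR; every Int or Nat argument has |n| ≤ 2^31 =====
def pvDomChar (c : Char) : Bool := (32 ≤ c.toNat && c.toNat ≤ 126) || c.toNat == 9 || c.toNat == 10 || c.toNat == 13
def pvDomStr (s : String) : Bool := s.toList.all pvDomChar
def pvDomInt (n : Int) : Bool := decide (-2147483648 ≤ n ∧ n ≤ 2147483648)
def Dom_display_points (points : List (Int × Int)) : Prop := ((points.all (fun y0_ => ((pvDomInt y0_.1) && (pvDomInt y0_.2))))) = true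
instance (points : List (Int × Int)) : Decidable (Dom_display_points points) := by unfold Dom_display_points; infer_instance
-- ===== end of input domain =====

-- B replaces A's mutable-grid scatter by a per-cell set-membership scan; objective: alternative (same cost).

-- ===== PORT A =====
-- Literal port of A: build an all-'.' grid, then write '*' at (max_y - y, x - min_x) for each point.
def display_points (points : List (Int × Int)) : List String :=
  match points with
  | [] => []  -- zip(*[]) raises ValueError; excluded by Pre_display_points
  | _ :: _ =>
    let xs := points.map Prod.fst
    let ys := points.map Prod.snd
    let min_x := (PySem.List.min? xs (fun v => v)).getD 0
    let max_x := (PySem.List.max? xs (fun v => v)).getD 0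
    let min_y := (PySem.List.min? ys (fun v => v)).getD 0
    let max_y := (PySem.List.max? ys (fun v => v)).getD 0
    let grid : List (List Char) :=
      (PySem.List.pyRange 0 (max_y - min_y + 1) 1).map (fun _ =>
        (PySem.List.pyRange 0 (max_x - min_x + 1) 1).map (fun _ => '.'))
    let grid := points.foldl (fun g p =>
      PySem.List.pySetD g (max_y - p.2)
        (PySem.List.pySetD (PySem.List.pyGetD g (max_y - p.2) []) (p.1 - min_x) '*')) grid
    grid.map (fun row => String.mk row)

-- ===== PORT B =====
-- Literal port of B: group points by row into a dict of x-sets, emit a blank row for empty rows,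
-- per-cell membership scan for rows that contain points. (`if cols:` = none-or-empty truthiness.)
def display_points_alt (points : List (Int × Int)) : List String :=
  match points with
  | [] => []  -- zip(*[]) raises ValueError; excluded by Pre_display_points
  | _ :: _ =>
    let xs := points.map Prod.fst
    let ys := points.map Prod.snd
    let min_x := (PySem.List.min? xs (fun v => v)).getD 0
    let max_x := (PySem.List.max? xs (fun v => v)).getD 0
    let min_y := (PySem.List.min? ys (fun v => v)).getD 0
    let max_y := (PySem.List.max? ys (fun v => v)).getD 0
    let rows := points.foldl (fun d p =>
      PySem.Dict.modify d p.2 PySem.Set.empty (fun s => PySem.Set.add s p.1)) PySem.Dict.empty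
    let blank := String.mk (List.replicate (max_x - min_x + 1).toNat '.')
    (PySem.List.pyRange max_y (min_y - 1) (-1)).foldl (fun out y =>
      out ++ [match PySem.Dict.get? rows y with
              | none => blank
              | some cols =>
                if cols.isEmpty then blank
                else String.mk ((PySem.List.pyRange min_x (max_x + 1) 1).map
                  (fun x => if x ∈ cols then '*' else '.'))]) []

-- ===== PRECONDITION & SPEC =====
-- Pre_ excludes only the empty list, on which A (and B) raise ValueError at `xs, ys = zip(*points)`.
def Pre_display_points (points : List (Int × Int)) : Prop := points ≠ []
instance (points : List (Int × Int)) : Decidable (Pre_display_points points) := by unfold Pre_display_points; infer_instance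
def pvWitness_display_points : (List (Int × Int)) := [(0, 0), (2, 1)]
def Spec_display_points (points : List (Int × Int)) (out : List String) : Prop := out = display_points_alt points
instance (points : List (Int × Int)) (out : List String) : Decidable (Spec_display_points points out) := by unfold Spec_display_points; infer_instance

-- ===== CLAIM (what is proved, stated in full; the proofs are below) =====
def Claim_equal_display_points : Prop := ∀ (points : List (Int × Int)), Dom_display_points points → Pre_display_points points → Spec_display_points points (display_points points)

-- ===== LEMMAS AND PROOFS =====

theorem pv_min_some (xs : List Int) (h : xs ≠ []) :
    ∃ m, PySem.List.min? xs (fun v => v) = some m ∧ ∀ y ∈ xs, m ≤ y := by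
  cases hm : PySem.List.min? xs (fun v => v) with
  | none => exact absurd ((PySem.List.min?_eq_none_iff _ _).mp hm) h
  | some m => exact ⟨m, rfl, fun y hy => PySem.List.min?_isMin hm y hy⟩

theorem pv_max_some (xs : List Int) (h : xs ≠ []) :
    ∃ m, PySem.List.max? xs (fun v => v) = some m ∧ ∀ y ∈ xs, y ≤ m := by
  cases hm : PySem.List.max? xs (fun v => v) with
  | none => exact absurd ((PySem.List.max?_eq_none_iff _ _).mp hm) h
  | some m => exact ⟨m, rfl, fun y hy => PySem.List.max?_isMax hm y hy⟩

theorem pv_write_shape (R C : Nat) (f : Nat → Nat → Char) (r0 c0 : Int)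
    (hr0 : 0 ≤ r0) (hrR : r0.toNat < R) (hc0 : 0 ≤ c0) (_hcC : c0.toNat < C) :
    PySem.List.pySetD ((List.range R).map (fun r => (List.range C).map (f r))) r0
      (PySem.List.pySetD
        (PySem.List.pyGetD ((List.range R).map (fun r => (List.range C).map (f r))) r0 []) c0 '*')
    = (List.range R).map (fun (r : Nat) => (List.range C).map (fun (c : Nat) =>
        if r = r0.toNat ∧ c = c0.toNat then '*' else f r c)) := by
  rw [PySem.List.pyGetD_eq_getElem _ _ hr0 (by simp; omega),
      PySem.List.pySetD_of_nonneg _ _ hr0, PySem.List.pySetD_of_nonneg _ _ hc0]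
  apply List.ext_getElem
  · simp
  · intro i h1 h2
    simp only [List.getElem_set, List.getElem_map, List.getElem_range] at *
    by_cases hi : r0.toNat = i
    · subst hi
      apply List.ext_getElem
      · simp
      · intro j h3 h4
        simp only [ite_true, true_and, List.getElem_set, List.getElem_map, List.getElem_range]
        by_cases hj : c0.toNat = j
        · simp [hj]
        · rw [if_neg hj, if_neg fun h => hj h.symm]
    · simp only [if_neg hi]
      apply List.map_congr_left
      intro c _
      rw [if_neg]
      rintro ⟨h, -⟩; exact hi h.symm

theorem pv_scatter_shape (mnx mxy : Int) (R C : Nat) :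
    ∀ (ps : List (Int × Int)) (f : Nat → Nat → Char),
    (∀ p ∈ ps, 0 ≤ mxy - p.2 ∧ (mxy - p.2).toNat < R ∧ 0 ≤ p.1 - mnx ∧ (p.1 - mnx).toNat < C) →
    ps.foldl (fun g p =>
      PySem.List.pySetD g (mxy - p.2)
        (PySem.List.pySetD (PySem.List.pyGetD g (mxy - p.2) []) (p.1 - mnx) '*'))
      ((List.range R).map (fun r => (List.range C).map (f r)))
    = (List.range R).map (fun (r : Nat) => (List.range C).map (fun (c : Nat) =>
        if ∃ p ∈ ps, mxy - p.2 = (r : Int) ∧ p.1 - mnx = (c : Int) then '*' else f r c)) := by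
  intro ps
  induction ps with
  | nil => intro f _; simp
  | cons p ps ih =>
    intro f hp
    obtain ⟨h1, h2, h3, h4⟩ := hp p List.mem_cons_self
    simp only [List.foldl_cons]
    rw [pv_write_shape R C f (mxy - p.2) (p.1 - mnx) h1 h2 h3 h4,
        ih _ (fun q hq => hp q (List.mem_cons_of_mem p hq))]
    apply List.map_congr_left
    intro r hr
    apply List.map_congr_left
    intro c hc
    by_cases hps : ∃ q ∈ ps, mxy - q.2 = (r : Int) ∧ q.1 - mnx = (c : Int)
    · rw [if_pos hps, if_pos]
      obtain ⟨q, hq, h⟩ := hps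
      exact ⟨q, List.mem_cons_of_mem p hq, h⟩
    · rw [if_neg hps]
      by_cases hpp : mxy - p.2 = (r : Int) ∧ p.1 - mnx = (c : Int)
      · rw [if_pos (by omega), if_pos ⟨p, List.mem_cons_self, hpp⟩]
      · rw [if_neg (by omega), if_neg]
        rintro ⟨q, hq, h⟩
        rcases List.mem_cons.1 hq with rfl | hq'
        · exact hpp h
        · exact hps ⟨q, hq', h⟩

-- Membership in the grouping dict built by B's first loop.
theorem pv_rows_getD (l : List (Int × Int)) :
    ∀ (d : PySem.Dict Int (PySem.Set Int)) (y x : Int),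
    (x ∈ (l.foldl (fun d p =>
        PySem.Dict.modify d p.2 PySem.Set.empty (fun s => PySem.Set.add s p.1)) d).getD y PySem.Set.empty)
    ↔ (x ∈ d.getD y PySem.Set.empty ∨ (x, y) ∈ l) := by
  induction l with
  | nil => intro d y x; simp
  | cons p t ih =>
    intro d y x
    rw [List.foldl_cons, ih]
    rw [PySem.Dict.getD_modify]
    by_cases hy : y = p.2
    · subst hy
      rw [if_pos rfl, PySem.Set.mem_add]
      constructor
      · rintro (⟨hs | rfl⟩ | hl)
        · exact Or.inl hs
        · exact Or.inr (List.mem_cons_self)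
        · exact Or.inr (List.mem_cons_of_mem _ hl)
      · rintro (hs | hm)
        · exact Or.inl (Or.inl hs)
        · rcases List.mem_cons.1 hm with h | h
          · exact Or.inl (Or.inr (congrArg Prod.fst h))
          · exact Or.inr h
    · rw [if_neg hy]
      constructor
      · rintro (hs | hl)
        · exact Or.inl hs
        · exact Or.inr (List.mem_cons_of_mem _ hl)
      · rintro (hs | hm)
        · exact Or.inl hs
        · rcases List.mem_cons.1 hm with h | h
          · exact absurd (congrArg Prod.snd h) (by simpa using hy)
          · exact Or.inr h

-- ===== VERDICT (by name: the statement is the Claim_ definition above) =====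
theorem display_points_spec : Claim_equal_display_points := by
  intro points hdom hpre
  unfold Spec_display_points
  obtain ⟨p0, rest, rfl⟩ := List.exists_cons_of_ne_nil hpre
  obtain ⟨mnx, hmnx, hmnxle⟩ := pv_min_some ((p0 :: rest).map Prod.fst) (by simp)
  obtain ⟨mxx, hmxx, hmxxge⟩ := pv_max_some ((p0 :: rest).map Prod.fst) (by simp)
  obtain ⟨mny, hmny, hmnyle⟩ := pv_min_some ((p0 :: rest).map Prod.snd) (by simp)
  obtain ⟨mxy, hmxy, hmxyge⟩ := pv_max_some ((p0 :: rest).map Prod.snd) (by simp)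
  have hb : ∀ q ∈ p0 :: rest, mnx ≤ q.1 ∧ q.1 ≤ mxx ∧ mny ≤ q.2 ∧ q.2 ≤ mxy := by
    intro q hq
    exact ⟨hmnxle _ (List.mem_map_of_mem hq), hmxxge _ (List.mem_map_of_mem hq),
           hmnyle _ (List.mem_map_of_mem hq), hmxyge _ (List.mem_map_of_mem hq)⟩
  simp only [display_points, display_points_alt]
  rw [hmnx, hmxx, hmny, hmxy]
  simp only [Option.getD_some]
  have hinit : (PySem.List.pyRange 0 (mxy - mny + 1) 1).map (fun _ =>
        (PySem.List.pyRange 0 (mxx - mnx + 1) 1).map (fun _ => '.'))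
      = (List.range ((mxy - mny + 1).toNat)).map (fun (r : Nat) =>
          (List.range ((mxx - mnx + 1).toNat)).map (fun (_ : Nat) => '.')) := by
    simp only [PySem.List.pyRange_one, List.map_map, Function.comp_def, sub_zero]
  rw [hinit,
      pv_scatter_shape mnx mxy ((mxy - mny + 1).toNat) ((mxx - mnx + 1).toNat) (p0 :: rest)
        (fun _ _ => '.')
        (by intro q hq; obtain ⟨b1, b2, b3, b4⟩ := hb q hq; exact ⟨by omega, by omega, by omega, by omega⟩)]
  rw [PySem.List.foldl_append_singleton_eq_map, List.nil_append,
      PySem.List.pyRange_neg_one mxy (mny - 1), PySem.List.pyRange_one mnx (mxx + 1)]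
  have e2 : mxy - (mny - 1) = mxy - mny + 1 := by ring
  have e3 : mxx + 1 - mnx = mxx - mnx + 1 := by ring
  rw [e2, e3]
  simp only [List.map_map, Function.comp_def]
  -- membership characterisation of the grouping dict
  have hmem : ∀ x y : Int,
      (x ∈ ((p0 :: rest).foldl (fun d p =>
          PySem.Dict.modify d p.2 PySem.Set.empty (fun s => PySem.Set.add s p.1))
          PySem.Dict.empty).getD y PySem.Set.empty) ↔ (x, y) ∈ p0 :: rest := by
    intro x y
    rw [pv_rows_getD, PySem.Dict.getD_empty]
    simp [PySem.Set.empty]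
  -- A's per-cell condition, rephrased as a point membership
  have hA : ∀ r c : Nat,
      (∃ q ∈ p0 :: rest, mxy - q.2 = (r : Int) ∧ q.1 - mnx = (c : Int))
      ↔ (mnx + (c : Int), mxy - (r : Int)) ∈ p0 :: rest := by
    intro r c
    constructor
    · rintro ⟨⟨a, b⟩, hq, hq1, hq2⟩
      simp only at hq1 hq2
      have ha : mnx + (c : Int) = a := by omega
      have hbb : mxy - (r : Int) = b := by omega
      rw [ha, hbb]; exact hq
    · intro h
      exact ⟨(mnx + (c : Int), mxy - (r : Int)), h, by constructor <;> ring⟩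
  apply List.map_congr_left
  intro r hr
  set rows := (p0 :: rest).foldl (fun d p =>
      PySem.Dict.modify d p.2 PySem.Set.empty (fun s => PySem.Set.add s p.1)) PySem.Dict.empty with hrows
  cases hy : PySem.Dict.get? rows (mxy - (r : Int)) with
  | none =>
    have hno : ∀ c : Nat, ¬ (∃ q ∈ p0 :: rest, mxy - q.2 = (r : Int) ∧ q.1 - mnx = (c : Int)) := by
      intro c hc
      have := (hmem (mnx + (c : Int)) (mxy - (r : Int))).mpr ((hA r c).mp hc)
      rw [PySem.Dict.getD_of_get?_eq_none _ _ hy] at this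
      simp [PySem.Set.empty] at this
    dsimp only
    apply congrArg String.mk
    rw [List.map_congr_left (fun c _ => if_neg (hno c))]
    simp
  | some cols =>
    have hcols : rows.getD (mxy - (r : Int)) PySem.Set.empty = cols :=
      PySem.Dict.getD_of_get?_eq_some _ _ hy
    have hiff : ∀ c : Nat,
        ((∃ q ∈ p0 :: rest, mxy - q.2 = (r : Int) ∧ q.1 - mnx = (c : Int)) ↔ (mnx + (c : Int)) ∈ cols) := by
      intro c
      rw [hA r c, ← hmem (mnx + (c : Int)) (mxy - (r : Int)), hcols]
    dsimp only
    by_cases he : cols.isEmpty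
    · have hno : ∀ c : Nat, ¬ (∃ q ∈ p0 :: rest, mxy - q.2 = (r : Int) ∧ q.1 - mnx = (c : Int)) := by
        intro c hc
        have := (hiff c).mp hc
        rw [List.isEmpty_iff.mp he] at this
        simp at this
      rw [if_pos he]
      apply congrArg String.mk
      rw [List.map_congr_left (fun c _ => if_neg (hno c))]
      simp
    · rw [if_neg he]
      apply congrArg String.mk
      exact List.map_congr_left (fun c _ => if_congr (hiff c) rfl rfl)
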